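-- pv_equiv track=rewrite | github.com/natiixnt/ContextBudget | redcon/cmd/compressors/kubectl_compressor.py | _column_offsets
-- ===== SOURCE A (Python) =====
-- def _column_offsets(header: str) -> list[int]:
--     """Return the start offset of each column. Columns are separated by 2+ spaces."""
--     offsets: list[int] = []
--     i = 0
--     n = len(header)
--     while i < n:
--         if header[i] != " ":
--             offsets.append(i)
--             while i < n:
--                 if header[i] == " " and i + 1 < n and header[i + 1] == " ":
--                     break
--                 i += 1
--             while i < n and header[i] == " ":
--                 i += 1
--         else:
--             i += 1
--     return offsets
-- ===== SOURCE B (Python) =====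
-- def _column_offsets(header: str) -> list[int]:
--     """Return the start offset of each column. Columns are separated by 2+ spaces."""
--     offsets: list[int] = []
--     run = 0        # length of the space run immediately before position j
--     seen = False   # whether any non-space character has occurred yet
--     for j, ch in enumerate(header):
--         if ch == " ":
--             run += 1
--         else:
--             if not seen or run >= 2:
--                 offsets.append(j)
--             seen = True
--             run = 0
--     return offsets
-- ===== Notes on version B (the rewrite author's own statement) =====
-- stated objective: simpler
-- what changed: Replaced A's nested while-loops (token scan with manual 2-space lookahead, then a space-skipping loop) by a single per-character pass that carries the length of the current space run and a seen-a-nonspace flag, appending an offset at each non-space reached at the start or after a 2+ space run.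
import Mathlib
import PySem

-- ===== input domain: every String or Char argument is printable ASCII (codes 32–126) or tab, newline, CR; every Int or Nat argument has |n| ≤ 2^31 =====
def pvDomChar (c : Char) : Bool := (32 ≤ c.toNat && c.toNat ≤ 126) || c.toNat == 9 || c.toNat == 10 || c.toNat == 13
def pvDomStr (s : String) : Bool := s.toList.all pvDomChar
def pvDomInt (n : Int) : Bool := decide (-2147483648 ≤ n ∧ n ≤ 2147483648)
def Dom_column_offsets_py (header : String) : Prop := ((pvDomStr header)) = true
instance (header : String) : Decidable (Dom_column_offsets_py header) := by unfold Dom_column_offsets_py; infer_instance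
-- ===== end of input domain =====

-- B replaces A's nested while-loops (token scan + separator skip) by a single per-character
-- fold carrying (space-run length, seen-a-nonspace) state; objective: simpler, same O(n) cost.


-- ===== PORT A =====
-- inner loop 1 of A: advance i until a run of 2+ spaces starts (or the end)
def tokEnd (cs : List Char) (n i : Nat) : Nat :=
  if h : i < n then
    if cs.getD i ' ' = ' ' ∧ i + 1 < n ∧ cs.getD (i+1) ' ' = ' ' then i
    else tokEnd cs n (i+1)
  else i
termination_by n - i
decreasing_by omega

-- inner loop 2 of A: skip spaces
def spEnd (cs : List Char) (n i : Nat) : Nat :=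
  if h : i < n then
    if cs.getD i ' ' = ' ' then spEnd cs n (i+1) else i
  else i
termination_by n - i
decreasing_by omega

theorem le_tokEnd (cs : List Char) (n i : Nat) : i ≤ tokEnd cs n i := by
  unfold tokEnd
  split
  · split
    · exact le_refl i
    · exact Nat.le_trans (Nat.le_succ i) (le_tokEnd cs n (i+1))
  · exact le_refl i
termination_by n - i
decreasing_by omega

theorem le_spEnd (cs : List Char) (n i : Nat) : i ≤ spEnd cs n i := by
  unfold spEnd
  split
  · split
    · exact Nat.le_trans (Nat.le_succ i) (le_spEnd cs n (i+1))
    · exact le_refl i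
  · exact le_refl i
termination_by n - i
decreasing_by omega

theorem tokEnd_advance (cs : List Char) (n i : Nat) (h : i < n)
    (hc : ¬ cs.getD i ' ' = ' ') : i + 1 ≤ tokEnd cs n i := by
  unfold tokEnd
  rw [dif_pos h, if_neg (by tauto)]
  exact le_tokEnd cs n (i+1)

-- outer while-loop of A
def loopA (cs : List Char) (n i : Nat) (acc : List Int) : List Int :=
  if h : i < n then
    if hc : ¬ cs.getD i ' ' = ' ' then
      loopA cs n (spEnd cs n (tokEnd cs n i)) (acc ++ [(i : Int)])
    else
      loopA cs n (i+1) acc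
  else acc
termination_by n - i
decreasing_by
  · have h1 := tokEnd_advance cs n i h hc
    have h2 := le_spEnd cs n (tokEnd cs n i)
    omega
  · omega

def column_offsets_py (header : String) : List Int :=
  loopA header.toList header.toList.length 0 []

-- ===== PORT B =====
def stepB (st : Int × Bool × List Int) (p : Int × Char) : Int × Bool × List Int :=
  match st, p with
  | (run, seen, acc), (j, ch) =>
    if ch = ' ' then (run + 1, seen, acc)
    else (0, true, if !seen || decide (2 ≤ run) then acc ++ [j] else acc)

def column_offsets_py_alt (header : String) : List Int :=
  ((PySem.List.enumerate header.toList 0).foldl stepB (0, false, [])).2.2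

-- ===== PRECONDITION & SPEC =====
def Spec_column_offsets_py (header : String) (out : List Int) : Prop := out = column_offsets_py_alt header
instance (header : String) (out : List Int) : Decidable (Spec_column_offsets_py header out) := by unfold Spec_column_offsets_py; infer_instance

-- ===== CLAIM (what is proved, stated in full; the proofs are below) =====
def Claim_equal_column_offsets_py : Prop := ∀ (header : String), Dom_column_offsets_py header → Spec_column_offsets_py header (column_offsets_py header)

-- ===== LEMMAS AND PROOFS =====

theorem tokEnd_le (cs : List Char) (n i : Nat) (h : i ≤ n) : tokEnd cs n i ≤ n := by
  unfold tokEnd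
  split
  · split
    · omega
    · exact tokEnd_le cs n (i+1) (by omega)
  · exact h
termination_by n - i
decreasing_by omega

theorem spEnd_le (cs : List Char) (n i : Nat) (h : i ≤ n) : spEnd cs n i ≤ n := by
  unfold spEnd
  split
  · split
    · exact spEnd_le cs n (i+1) (by omega)
    · exact h
  · exact h
termination_by n - i
decreasing_by omega

-- no 2-space run starts strictly inside the token scan
theorem tokEnd_min (cs : List Char) (n i k : Nat) (hik : i ≤ k) (hk : k < tokEnd cs n i) :
    ¬ (cs.getD k ' ' = ' ' ∧ k + 1 < n ∧ cs.getD (k+1) ' ' = ' ') := by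
  unfold tokEnd at hk
  by_cases h : i < n
  · rw [dif_pos h] at hk
    by_cases hg : cs.getD i ' ' = ' ' ∧ i + 1 < n ∧ cs.getD (i+1) ' ' = ' '
    · rw [if_pos hg] at hk; omega
    · rw [if_neg hg] at hk
      rcases Nat.eq_or_lt_of_le hik with rfl | hik'
      · exact hg
      · exact tokEnd_min cs n (i+1) k hik' hk
  · rw [dif_neg h] at hk; omega
termination_by n - i
decreasing_by omega

theorem tokEnd_end (cs : List Char) (n i : Nat) (h : i ≤ n) :
    tokEnd cs n i = n ∨
      (tokEnd cs n i < n ∧ cs.getD (tokEnd cs n i) ' ' = ' ' ∧ tokEnd cs n i + 1 < n ∧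
        cs.getD (tokEnd cs n i + 1) ' ' = ' ') := by
  unfold tokEnd
  by_cases hlt : i < n
  · rw [dif_pos hlt]
    by_cases hg : cs.getD i ' ' = ' ' ∧ i + 1 < n ∧ cs.getD (i+1) ' ' = ' '
    · rw [if_pos hg]; right; exact ⟨hlt, hg.1, hg.2.1, hg.2.2⟩
    · rw [if_neg hg]; exact tokEnd_end cs n (i+1) (by omega)
  · rw [dif_neg hlt]; left; omega
termination_by n - i
decreasing_by omega

theorem spEnd_spaces (cs : List Char) (n i k : Nat) (hik : i ≤ k) (hk : k < spEnd cs n i) :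
    cs.getD k ' ' = ' ' := by
  unfold spEnd at hk
  by_cases h : i < n
  · rw [dif_pos h] at hk
    by_cases hg : cs.getD i ' ' = ' '
    · rw [if_pos hg] at hk
      rcases Nat.eq_or_lt_of_le hik with rfl | hik'
      · exact hg
      · exact spEnd_spaces cs n (i+1) k hik' hk
    · rw [if_neg hg] at hk; omega
  · rw [dif_neg h] at hk; omega
termination_by n - i
decreasing_by omega

theorem spEnd_end (cs : List Char) (n i : Nat) (h : i ≤ n) :
    spEnd cs n i = n ∨ (spEnd cs n i < n ∧ ¬ cs.getD (spEnd cs n i) ' ' = ' ') := by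
  unfold spEnd
  by_cases hlt : i < n
  · rw [dif_pos hlt]
    by_cases hg : cs.getD i ' ' = ' '
    · rw [if_pos hg]; exact spEnd_end cs n (i+1) (by omega)
    · rw [if_neg hg]; right; exact ⟨hlt, hg⟩
  · rw [dif_neg hlt]; left; omega
termination_by n - i
decreasing_by omega

theorem spEnd_two (cs : List Char) (n i : Nat) (h1 : i + 1 < n)
    (hs0 : cs.getD i ' ' = ' ') (hs1 : cs.getD (i+1) ' ' = ' ') :
    i + 2 ≤ spEnd cs n i := by
  rw [spEnd, dif_pos (by omega), if_pos hs0, spEnd, dif_pos h1, if_pos hs1]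
  exact le_spEnd cs n (i+2)

-- one fold step at a known position
theorem fold_step (cs : List Char) (j : Nat) (hj : j < cs.length) (st : Int × Bool × List Int) :
    (PySem.List.enumerate (cs.drop j) (j : Int)).foldl stepB st
      = (PySem.List.enumerate (cs.drop (j+1)) ((j+1 : Nat) : Int)).foldl stepB (stepB st ((j : Int), cs[j])) := by
  rw [List.drop_eq_getElem_cons hj, PySem.List.enumerate_cons]
  simp [List.foldl_cons]

theorem getD_eq_getElem (cs : List Char) (j : Nat) (hj : j < cs.length) :
    cs.getD j ' ' = cs[j] := List.getD_eq_getElem cs ' ' hj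

-- fold across a block of spaces: run grows by its length, nothing else changes
theorem spaceFold (cs : List Char) (j m : Nat) (r : Int) (seen : Bool) (acc : List Int)
    (hjm : j ≤ m) (hm : m ≤ cs.length)
    (hsp : ∀ k, j ≤ k → k < m → cs.getD k ' ' = ' ') :
    (PySem.List.enumerate (cs.drop j) (j : Int)).foldl stepB (r, seen, acc)
      = (PySem.List.enumerate (cs.drop m) (m : Int)).foldl stepB (r + ((m - j : Nat) : Int), seen, acc) := by
  rcases Nat.eq_or_lt_of_le hjm with rfl | hlt
  · simp
  · have hj : j < cs.length := by omega
    rw [fold_step cs j hj]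
    have hcj : cs[j] = ' ' := by
      rw [← getD_eq_getElem cs j hj]; exact hsp j (le_refl j) hlt
    have hst : stepB (r, seen, acc) ((j : Int), cs[j]) = (r + 1, seen, acc) := by
      simp [stepB, hcj]
    rw [hst, spaceFold cs (j+1) m (r+1) seen acc (by omega) hm
        (fun k hk1 hk2 => hsp k (by omega) hk2)]
    have hcast : r + 1 + ((m - (j+1) : Nat) : Int) = r + ((m - j : Nat) : Int) := by omega
    rw [hcast]
termination_by m - j
decreasing_by omega

-- fold across a token (no 2-space run inside): the accumulator is unchanged
theorem tokFold (cs : List Char) (i0 t : Nat) (ht : t ≤ cs.length)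
    (hmin : ∀ k, i0 ≤ k → k < t → ¬ (cs.getD k ' ' = ' ' ∧ k + 1 < cs.length ∧ cs.getD (k+1) ' ' = ' '))
    (j : Nat) (r : Int) (acc : List Int) (hi0 : i0 ≤ j) (hjt : j ≤ t) (hr : 0 ≤ r)
    (h1 : 1 ≤ r → 1 ≤ j ∧ i0 ≤ j - 1 ∧ cs.getD (j-1) ' ' = ' ')
    (h2 : 2 ≤ r → 2 ≤ j ∧ i0 ≤ j - 2 ∧ cs.getD (j-2) ' ' = ' ' ∧ cs.getD (j-1) ' ' = ' ') :
    ∃ rt : Int, 0 ≤ rt ∧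
      (PySem.List.enumerate (cs.drop j) (j : Int)).foldl stepB (r, true, acc)
        = (PySem.List.enumerate (cs.drop t) (t : Int)).foldl stepB (rt, true, acc) := by
  rcases Nat.eq_or_lt_of_le hjt with rfl | hlt
  · exact ⟨r, hr, rfl⟩
  · have hj : j < cs.length := by omega
    rw [fold_step cs j hj]
    by_cases hcj : cs[j] = ' '
    · -- a space inside the token: run grows, invariant shifts
      have hgd : cs.getD j ' ' = ' ' := by rw [getD_eq_getElem cs j hj]; exact hcj
      have := tokFold cs i0 t ht hmin (j+1) (r+1) acc (by omega) (by omega) (by omega)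
        (fun _ => ⟨by omega, by omega, by simpa using hgd⟩)
        (fun hge => by
          have h1' := h1 (by omega)
          exact ⟨by omega, by omega, by simpa using h1'.2.2, by simpa using hgd⟩)
      simpa [stepB, hcj] using this
    · -- a non-space inside the token: run must be < 2, so nothing is appended
      have hrlt : ¬ (2 ≤ r) := by
        intro hge
        obtain ⟨hj2, hi02, hsA, hsB⟩ := h2 hge
        apply hmin (j-2) (by omega) (by omega)
        refine ⟨hsA, by omega, ?_⟩
        have hjj : j - 2 + 1 = j - 1 := by omega
        rw [hjj]; exact hsB
      have := tokFold cs i0 t ht hmin (j+1) 0 acc (by omega) (by omega) (by omega)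
        (by omega) (by omega)
      simpa [stepB, hcj, decide_eq_false hrlt] using this
termination_by t - j
decreasing_by all_goals omega

-- main correspondence between A's outer loop and B's fold
theorem mainA (cs : List Char) : ∀ (fuel i : Nat) (run : Int) (seen : Bool) (acc : List Int),
    cs.length - i ≤ fuel → i ≤ cs.length →
    (seen = true → i = cs.length ∨ (¬ cs.getD i ' ' = ' ' ∧ 2 ≤ run)) →
    loopA cs cs.length i acc
      = ((PySem.List.enumerate (cs.drop i) (i : Int)).foldl stepB (run, seen, acc)).2.2 := by
  intro fuel
  induction fuel with
  | zero =>
    intro i run seen acc hfuel hin _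
    have : i = cs.length := by omega
    subst this
    rw [loopA, dif_neg (by omega)]
    simp
  | succ fuel ih =>
    intro i run seen acc hfuel hin hseen
    by_cases hlt : i < cs.length
    · rw [loopA, dif_pos hlt]
      by_cases hc : ¬ cs.getD i ' ' = ' '
      · rw [dif_pos hc]
        -- RHS: one step appends i (since !seen ∨ run ≥ 2)
        have hci : ¬ cs[i] = ' ' := by rwa [getD_eq_getElem cs i hlt] at hc
        have happ : (!seen || decide (2 ≤ run)) = true := by
          cases seen with
          | false => simp
          | true =>
            rcases hseen rfl with h | h
            · omega
            · simp [h.2]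
        rw [fold_step cs i hlt]
        have hstep : stepB (run, seen, acc) ((i : Int), cs[i]) = (0, true, acc ++ [(i : Int)]) := by
          simp [stepB, hci, happ]
        rw [hstep]
        -- token phase: i+1 .. t
        set t := tokEnd cs cs.length i with hT
        have hti : i + 1 ≤ t := tokEnd_advance cs cs.length i hlt hc
        have htn : t ≤ cs.length := tokEnd_le cs cs.length i (by omega)
        have hmin : ∀ k, i + 1 ≤ k → k < t →
            ¬ (cs.getD k ' ' = ' ' ∧ k + 1 < cs.length ∧ cs.getD (k+1) ' ' = ' ') :=
          fun k hk1 hk2 => tokEnd_min cs cs.length i k (by omega) hk2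
        obtain ⟨rt, hrt, heq⟩ := tokFold cs (i+1) t htn hmin (i+1) 0 (acc ++ [(i : Int)])
          (le_refl _) hti (le_refl 0) (by omega) (by omega)
        rw [heq]
        -- space phase: t .. m
        set m := spEnd cs cs.length t with hM
        have htm : t ≤ m := le_spEnd cs cs.length t
        have hmn : m ≤ cs.length := spEnd_le cs cs.length t htn
        have hsp : ∀ k, t ≤ k → k < m → cs.getD k ' ' = ' ' :=
          fun k hk1 hk2 => spEnd_spaces cs cs.length t k hk1 hk2
        rw [spaceFold cs t m rt true (acc ++ [(i : Int)]) htm hmn hsp]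
        -- tail: apply the IH at m
        have hseen' : (true : Bool) = true → m = cs.length ∨
            (¬ cs.getD m ' ' = ' ' ∧ 2 ≤ rt + ((m - t : Nat) : Int)) := by
          intro _
          rcases spEnd_end cs cs.length t htn with hend | ⟨hmlt, hmns⟩
          · left; exact hend
          · right
            refine ⟨hmns, ?_⟩
            rcases tokEnd_end cs cs.length i (by omega) with h | ⟨h1, h2, h3, h4⟩
            · rw [← hT] at h; omega
            · rw [← hT] at h1 h2 h3 h4
              have := spEnd_two cs cs.length t h3 h2 h4
              omega
        exact ih m (rt + ((m - t : Nat) : Int)) true (acc ++ [(i : Int)])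
          (by omega) hmn hseen'
      · rw [dif_neg hc]
        rw [not_not] at hc
        have hci : cs[i] = ' ' := by rwa [getD_eq_getElem cs i hlt] at hc
        have hsf : seen = false := by
          cases seen with
          | false => rfl
          | true =>
            rcases hseen rfl with h | h
            · omega
            · exact absurd hc h.1
        subst hsf
        rw [fold_step cs i hlt]
        have hstep : stepB (run, false, acc) ((i : Int), cs[i]) = (run + 1, false, acc) := by
          simp [stepB, hci]
        rw [hstep]
        exact ih (i+1) (run + 1) false acc (by omega) (by omega) (by simp)
    · have : i = cs.length := by omega
      subst this
      rw [loopA, dif_neg (by omega)]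
      simp

-- ===== VERDICT (by name: the statement is the Claim_ definition above) =====
theorem column_offsets_py_spec : Claim_equal_column_offsets_py := by
  intro header _
  unfold Spec_column_offsets_py column_offsets_py column_offsets_py_alt
  have := mainA header.toList header.toList.length 0 0 false [] (by omega) (by omega) (by simp)
  simpa using this
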